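-- pv_equiv track=rewrite | github.com/yalda1205/NGS-data-analysis | MismatchedSpacer.py | find_most_similar_with_mismatches
-- ===== SOURCE A (Python) =====
-- def find_most_similar_with_mismatches(target, smaller_seq):
--     max_score = 0
--     best_match = ''
--     mismatch_positions = []
--
--     for i in range(len(target) - len(smaller_seq) + 1):
--         score = 0
--         current_mismatch_positions = []
--         for j, (a, b) in enumerate(zip(target[i:i+len(smaller_seq)], smaller_seq)):
--             if a == b:
--                 score += 1
--             else:
--                 current_mismatch_positions.append(j)
--
--         if score > max_score:
--             max_score = score
--             best_match = target[i:i+len(smaller_seq)]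
--             mismatch_positions = current_mismatch_positions
--
--     return best_match, max_score, mismatch_positions
-- ===== SOURCE B (Python) =====
-- def find_most_similar_with_mismatches(target, smaller_seq):
--     # Column-major scoring: one pass per pattern position votes into a score
--     # table; the best window's details are reconstructed once at the end.
--     n, m = len(target), len(smaller_seq)
--     k = n - m + 1
--     if k <= 0:
--         return '', 0, []
--     scores = [0] * k
--     for j, c in enumerate(smaller_seq):
--         col = target[j:j + k]
--         scores = [sc + (d == c) for sc, d in zip(scores, col)]
--     best_score = max(scores)
--     if best_score == 0:
--         return '', 0, []
--     best = scores.index(best_score)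
--     window = target[best:best + m]
--     return window, best_score, [j for j, (x, y) in enumerate(zip(window, smaller_seq)) if x != y]
-- ===== Notes on version B (the rewrite author's own statement) =====
-- stated objective: alternative
-- what changed: A rescans every window, building a mismatch list per window and tracking the running best; B votes column-by-column of the pattern into a single score table, then takes the first argmax and reconstructs the winning window's mismatch positions exactly once.
import Mathlib
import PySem

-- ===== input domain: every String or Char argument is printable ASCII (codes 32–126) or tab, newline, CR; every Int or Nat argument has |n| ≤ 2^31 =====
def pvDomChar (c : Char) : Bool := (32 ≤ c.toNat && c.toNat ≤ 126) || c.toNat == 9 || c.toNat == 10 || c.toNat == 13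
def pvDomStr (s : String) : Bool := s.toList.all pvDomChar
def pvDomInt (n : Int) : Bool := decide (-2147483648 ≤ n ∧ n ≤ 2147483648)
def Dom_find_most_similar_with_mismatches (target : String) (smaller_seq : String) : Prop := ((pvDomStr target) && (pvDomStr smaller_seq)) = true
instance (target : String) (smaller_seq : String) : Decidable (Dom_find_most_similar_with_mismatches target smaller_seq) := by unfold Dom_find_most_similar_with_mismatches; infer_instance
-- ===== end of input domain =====

-- B replaces A's per-window rescan (with a mismatch list built for every window) by
-- column-major voting into a score table plus a single reconstruction of the winner
-- (objective: alternative decomposition, same asymptotic cost).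

-- ===== PORT A =====
def find_most_similar_with_mismatches (target : String) (smaller_seq : String) : String × Int × List Int :=
  let t := target.toList
  let s := smaller_seq.toList
  -- state = (max_score, best_match, mismatch_positions)
  let r := (PySem.List.pyRange 0 ((t.length : Int) - (s.length : Int) + 1) 1).foldl
    (fun (st : Int × String × List Int) i =>
      let window := PySem.List.slice t (some i) (some (i + (s.length : Int)))
      -- inner loop: for j,(a,b) in enumerate(zip(window, smaller_seq))
      let p := (PySem.List.enumerate (window.zip s) 0).foldl
        (fun (q : Int × List Int) jab =>
          if jab.2.1 = jab.2.2 then (q.1 + 1, q.2) else (q.1, q.2 ++ [jab.1]))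
        (0, [])
      if p.1 > st.1 then (p.1, String.ofList window, p.2) else st)
    (0, "", [])
  (r.2.1, r.1, r.2.2)

-- ===== PORT B =====
def find_most_similar_with_mismatches_alt (target : String) (smaller_seq : String) : String × Int × List Int :=
  let t := target.toList
  let s := smaller_seq.toList
  let n : Int := t.length
  let m : Int := s.length
  let k : Int := n - m + 1
  if k ≤ 0 then ("", 0, [])
  else
    let scores0 : List Int := List.replicate k.toNat 0
    -- for j, c in enumerate(smaller_seq): scores = [sc + (d == c) for sc, d in zip(scores, target[j:j+k])]
    let scores := (PySem.List.enumerate s 0).foldl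
      (fun (sc : List Int) jc =>
        let col := PySem.List.slice t (some jc.1) (some (jc.1 + k))
        (sc.zip col).map (fun p => p.1 + (if p.2 = jc.2 then 1 else 0)))
      scores0
    match PySem.List.max? scores (fun y => y) with
    | none => ("", 0, [])      -- unreachable: k > 0 so scores ≠ []
    | some best_score =>
      if best_score = 0 then ("", 0, [])
      else
        match PySem.List.index? scores best_score with
        | none => ("", 0, [])  -- unreachable: best_score ∈ scores
        | some best =>
          let window := PySem.List.slice t (some (best : Int)) (some ((best : Int) + m))
          (String.ofList window, best_score,
            ((PySem.List.enumerate (window.zip s) 0).filter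
              (fun p => p.2.1 ≠ p.2.2)).map (·.1))

-- ===== PRECONDITION & SPEC =====
def Spec_find_most_similar_with_mismatches (target : String) (smaller_seq : String) (out : String × Int × List Int) : Prop := out = find_most_similar_with_mismatches_alt target smaller_seq
instance (target : String) (smaller_seq : String) (out : String × Int × List Int) : Decidable (Spec_find_most_similar_with_mismatches target smaller_seq out) := by unfold Spec_find_most_similar_with_mismatches; infer_instance

-- ===== CLAIM (what is proved, stated in full; the proofs are below) =====
def Claim_equal_find_most_similar_with_mismatches : Prop := ∀ (target : String) (smaller_seq : String), Dom_find_most_similar_with_mismatches target smaller_seq → Spec_find_most_similar_with_mismatches target smaller_seq (find_most_similar_with_mismatches target smaller_seq)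

-- ===== LEMMAS AND PROOFS =====
-- generic characterisation of A's inner loop
theorem pvInner (L : List (Char × Char)) : ∀ (a c : Int) (acc : List Int),
    (PySem.List.enumerate L a).foldl
      (fun (q : Int × List Int) jab =>
        if jab.2.1 = jab.2.2 then (q.1 + 1, q.2) else (q.1, q.2 ++ [jab.1])) (c, acc)
    = (c + (L.countP (fun p => p.1 = p.2) : Int),
       acc ++ ((PySem.List.enumerate L a).filter (fun p => p.2.1 ≠ p.2.2)).map (·.1)) := by
  induction L with
  | nil => intro a c acc; simp [PySem.List.enumerate_nil]
  | cons x L ih =>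
    intro a c acc
    rw [PySem.List.enumerate_cons]
    by_cases h : x.1 = x.2
    · simp [h, ih (a+1) (c+1) acc]; ring
    · simp [h, ih (a+1) c (acc ++ [a])]

theorem pvPickConst {β : Type} (L : List (Int × β)) : ∀ (st : Int × β),
    (∀ x ∈ L, x.1 ≤ st.1) →
    L.foldl (fun st x => if x.1 > st.1 then x else st) st = st := by
  induction L with
  | nil => intro st _; rfl
  | cons x L ih =>
    intro st h
    have hx : ¬ (x.1 > st.1) := by have := h x (by simp); omega
    simp only [List.foldl_cons, if_neg hx]
    exact ih st (fun y hy => h y (by simp [hy]))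

theorem pvPickSpec {β : Type} (L : List (Int × β)) : ∀ (st : Int × β) (b : Nat) (hb : b < L.length),
    (∀ x ∈ L, x.1 ≤ L[b].1) → (∀ j (hj : j < b), (L[j]'(by omega)).1 < L[b].1) →
    st.1 < L[b].1 →
    L.foldl (fun st x => if x.1 > st.1 then x else st) st = L[b] := by
  induction L with
  | nil => intro st b hb; simp at hb
  | cons x L ih =>
    intro st b hb hmax hfirst hst
    cases b with
    | zero =>
      simp only [List.getElem_cons_zero] at hmax hst
      simp only [List.foldl_cons, if_pos (show x.1 > st.1 from hst)]
      have : ∀ y ∈ L, y.1 ≤ x.1 := fun y hy => hmax y (by simp [hy])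
      simpa using pvPickConst L x this
    | succ b' =>
      have hb' : b' < L.length := by simpa using hb
      simp only [List.getElem_cons_succ] at hmax hfirst hst ⊢
      have hx : x.1 < L[b'].1 := by
        have := hfirst 0 (by omega); simpa using this
      simp only [List.foldl_cons]
      by_cases hc : x.1 > st.1
      · rw [if_pos hc]
        exact ih x b' (by simpa using hb) (fun y hy => hmax y (by simp [hy]))
          (fun j hj => by have := hfirst (j+1) (by omega); simpa using this) hx
      · rw [if_neg hc]
        exact ih st b' (by simpa using hb) (fun y hy => hmax y (by simp [hy]))
          (fun j hj => by have := hfirst (j+1) (by omega); simpa using this) hst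

def pvPcnt (t s : List Char) (j i : Nat) : Nat :=
  (((t.drop i).take j).zip (s.take j)).countP (fun p => p.1 = p.2)

theorem pvPcnt_zero (t s : List Char) (i : Nat) : pvPcnt t s 0 i = 0 := by
  simp [pvPcnt]

theorem pvPcnt_succ (t s : List Char) (k a i : Nat) (hk : k + s.length = t.length + 1)
    (ha : a < s.length) (hi : i < k) :
    pvPcnt t s (a+1) i
      = pvPcnt t s a i + (if t[i+a]'(by omega) = s[a]'ha then 1 else 0) := by
  have hia : i + a < t.length := by omega
  have h1 : (t.drop i).take (a+1) = (t.drop i).take a ++ [t[i+a]'hia] := by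
    rw [List.take_succ]
    congr 1
    rw [List.getElem?_drop]
    simp [List.getElem?_eq_getElem hia]
  have h2 : s.take (a+1) = s.take a ++ [s[a]'ha] := by
    rw [List.take_succ]
    congr 1
    simp [List.getElem?_eq_getElem ha]
  have hlen : ((t.drop i).take a).length = (s.take a).length := by
    simp [List.length_take, List.length_drop]
    omega
  unfold pvPcnt
  rw [h1, h2, List.zip_append hlen, List.countP_append]
  simp [List.countP_cons]

theorem pvColStep (t s : List Char) (k a : Nat) (hk : k + s.length = t.length + 1)
    (ha : a < s.length) :
    (((List.range k).map (fun i => (pvPcnt t s a i : Int))).zip ((t.drop a).take k)).map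
        (fun p => p.1 + (if p.2 = s[a]'ha then 1 else 0))
      = (List.range k).map (fun i => (pvPcnt t s (a+1) i : Int)) := by
  have hcol : ((t.drop a).take k).length = k := by
    simp [List.length_take, List.length_drop]; omega
  apply List.ext_getElem
  · simp [hcol]
  · intro i h1 h2
    have hik : i < k := by simpa using h2
    simp only [List.getElem_map, List.getElem_zip, List.getElem_range, List.getElem_take,
      List.getElem_drop]
    rw [pvPcnt_succ t s k a i hk ha hik]
    have : a + i = i + a := by omega
    simp_rw [this]
    push_cast
    split_ifs <;> simp

theorem pvScoresInv (t s : List Char) (k : Nat) (hk : k + s.length = t.length + 1)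
    (s2 : List Char) : ∀ (a : Nat), a ≤ s.length → s.drop a = s2 →
    (PySem.List.enumerate s2 (a : Int)).foldl
      (fun (sc : List Int) jc =>
        (sc.zip (PySem.List.slice t (some jc.1) (some (jc.1 + (k : Int))))).map
          (fun p => p.1 + (if p.2 = jc.2 then 1 else 0)))
      ((List.range k).map (fun i => (pvPcnt t s a i : Int)))
    = (List.range k).map (fun i => (pvPcnt t s s.length i : Int)) := by
  induction s2 with
  | nil =>
    intro a hale hdrop
    have : a = s.length := by
      have := congrArg List.length hdrop; simp at this; omega
    subst this
    simp [PySem.List.enumerate_nil]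
  | cons c s2' ih =>
    intro a hale hdrop
    have ha : a < s.length := by
      have := congrArg List.length hdrop; simp at this; omega
    have hc : s[a]'ha = c := by
      have h0 : s[a]? = some c := by
        rw [show a = a + 0 by omega, ← List.getElem?_drop, hdrop]; rfl
      simpa [List.getElem?_eq_getElem ha] using h0
    have hdrop' : s.drop (a+1) = s2' := by
      have : s.drop (a+1) = (s.drop a).drop 1 := by
        rw [List.drop_drop]
      rw [this, hdrop]; rfl
    rw [PySem.List.enumerate_cons, List.foldl_cons]
    rw [PySem.List.slice_natCast_add]
    rw [← hc, pvColStep t s k a hk ha]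
    have := ih (a+1) (by omega) hdrop'
    simpa [Nat.cast_add] using this

theorem pvCnt_full (t s : List Char) (q : Nat) :
    (((t.drop q).take s.length).zip s).countP (fun p => p.1 = p.2) = pvPcnt t s s.length q := by
  unfold pvPcnt; rw [List.take_length]

def pvTrip (t s : List Char) (q : Nat) : Int × String × List Int :=
  ((pvPcnt t s s.length q : Int),
   String.ofList ((t.drop q).take s.length),
   ((PySem.List.enumerate (((t.drop q).take s.length).zip s) 0).filter
     (fun p => p.2.1 ≠ p.2.2)).map (·.1))

theorem pvAfold (t s : List Char) (k : Nat) :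
    List.foldl (fun (x : Int × String × List Int) (y : Nat) =>
      if (pvPcnt t s s.length y : Int) > x.1 then
        ((pvPcnt t s s.length y : Int), String.ofList (List.take s.length (List.drop y t)),
          List.map (fun x => x.1) (List.filter (fun p => decide (p.2.1 ≠ p.2.2))
            (PySem.List.enumerate ((List.take s.length (List.drop y t)).zip s))))
      else x) (0, "", []) (List.range k)
    = ((List.range k).map (pvTrip t s)).foldl (fun x p => if p.1 > x.1 then p else x) (0, "", []) := by
  rw [List.foldl_map]
  rfl


-- ===== VERDICT (by name: the statement is the Claim_ definition above) =====
theorem find_most_similar_with_mismatches_spec : Claim_equal_find_most_similar_with_mismatches := by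
  unfold Claim_equal_find_most_similar_with_mismatches
  intro target smaller_seq _
  unfold Spec_find_most_similar_with_mismatches
  unfold find_most_similar_with_mismatches find_most_similar_with_mismatches_alt
  dsimp only
  set t := target.toList with ht
  set s := smaller_seq.toList with hs
  by_cases hK : (t.length : Int) - (s.length : Int) + 1 ≤ 0
  · rw [PySem.List.pyRange_one_eq_nil hK, if_pos hK]
    rfl
  · rw [if_neg hK]
    set k : Nat := ((t.length : Int) - (s.length : Int) + 1).toNat with hkdef
    have hkK : ((k : Nat) : Int) = (t.length : Int) - (s.length : Int) + 1 := by omega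
    have hk : k + s.length = t.length + 1 := by omega
    rw [← hkK]
    rw [PySem.List.pyRange_one]
    rw [List.foldl_map]
    simp only [zero_add, Int.toNat_natCast, PySem.List.slice_natCast_add, pvInner,
      List.nil_append, pvCnt_full, sub_zero, Int.toNat_natCast]
    rw [pvAfold]
    set S := (List.range k).map (fun i => (pvPcnt t s s.length i : Int)) with hS
    set L := (List.range k).map (pvTrip t s) with hL
    have h0 : List.replicate k (0:Int) = (List.range k).map (fun i => (pvPcnt t s 0 i : Int)) := by
      simp [pvPcnt_zero]
    have hScores : List.foldl
        (fun (sc : List Int) (jc : Int × Char) =>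
          List.map (fun p => p.1 + if p.2 = jc.2 then 1 else 0)
            (sc.zip (PySem.List.slice t (some jc.1) (some (jc.1 + (k : Int))))))
        (List.replicate k 0) (PySem.List.enumerate s) = S := by
      rw [h0, hS]
      simpa using pvScoresInv t s k hk s 0 (by omega) (by simp)
    rw [hScores]
    have hk1 : 1 ≤ k := by omega
    have hSlen : S.length = k := by simp [hS]
    have hmemS : ∀ x ∈ L, x.1 ∈ S := by
      intro x hx
      rcases List.mem_map.1 hx with ⟨q, hq, rfl⟩
      exact List.mem_map.2 ⟨q, hq, rfl⟩
    cases hSne : PySem.List.max? S (fun y => y) with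
    | none =>
      exfalso
      have : S = [] := (PySem.List.max?_eq_none_iff S (fun y => y)).1 hSne
      rw [this] at hSlen
      simp at hSlen
      omega
    | some M =>
      dsimp only
      by_cases hM0 : M = 0
      · subst hM0
        rw [if_pos rfl]
        have hle : ∀ x ∈ L, x.1 ≤ (0 : Int) := fun x hx =>
          PySem.List.max?_isMax hSne x.1 (hmemS x hx)
        rw [pvPickConst L ((0 : Int), ("" : String), ([] : List Int)) hle]
      · rw [if_neg hM0]
        have hMem : M ∈ S := PySem.List.max?_mem hSne
        cases hidx : PySem.List.index? S M with
        | none =>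
          exact absurd hMem ((PySem.List.index?_eq_none_iff S M).1 hidx)
        | some b =>
          obtain ⟨hbl, hSb, hprev⟩ := PySem.List.getElem_of_index?_eq_some hidx
          have hbk : b < k := by omega
          have hLS : ∀ j (hj : j < k), (L[j]'(by simp [hL]; omega)).1 = S[j]'(by omega) := by
            intro j hj
            simp [hL, hS, pvTrip]
          have hMpos : 0 < M := by
            rcases List.mem_map.1 hMem with ⟨q, hq, rfl⟩
            omega
          have hLlen : L.length = k := by simp [hL]
          have hLb1 : (L[b]'(by omega)).1 = M := by rw [hLS b hbk]; exact hSb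
          have hmax : ∀ x ∈ L, x.1 ≤ (L[b]'(by omega)).1 := by
            intro x hx; rw [hLb1]; exact PySem.List.max?_isMax hSne x.1 (hmemS x hx)
          have hfirst : ∀ j (hj : j < b), (L[j]'(by omega)).1 < (L[b]'(by omega)).1 := by
            intro j hj
            rw [hLb1, hLS j (by omega)]
            have hne := hprev j hj
            have hle : S[j]'(by omega) ≤ M := PySem.List.max?_isMax hSne _ (S.getElem_mem _)
            omega
          rw [pvPickSpec L (0, "", []) b (by omega) hmax hfirst (by rw [hLb1]; exact hMpos)]
          dsimp only
          have hLbT : L[b]'(by omega) = pvTrip t s b := by simp [hL]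
          have hPb : (pvPcnt t s s.length b : Int) = M := by
            rw [← hSb]; simp [hS]
          rw [hLbT]
          simp [pvTrip, hPb]
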